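-- pv_equiv track=rewrite | github.com/jwesparcia/pl | backend/app.py | get_movie_clusters
-- ===== SOURCE A (Python) =====
-- THEME_CLUSTERS = {
--     "PARANORMAL":   {"paranormal_horror", "haunted_location", "demonic_possession"},
--     "SPACE_SCI_FI": {"space_sci_fi", "space_travel_loop", "alien_contact"},
--     "AI_SCI_FI":    {"ai_sci_fi", "artificial_intelligence"},
--     "FANTASY":      {"epic_fantasy", "magical_world"},
--     "DYSTOPIA":     {"dystopia_apocalypse"},
--     "CRIME_NOIR":   {"noir_thriller", "serial_killer"},
--     "ADVENTURE_SEA": {"maritime_survival"}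
-- }
--
-- def get_movie_clusters(movie):
--     """Maps high-value themes to their respective conceptual clusters."""
--     high_themes = set(movie.get('high_themes', []))
--     themes = set(movie.get('themes', []))
--     combined = high_themes | themes
--
--     found_clusters = set()
--     for cluster_name, keywords in THEME_CLUSTERS.items():
--         if any(kw in combined for kw in keywords):
--             found_clusters.add(cluster_name)
--     return found_clusters
-- ===== SOURCE B (Python) =====
-- # Inverted index: each cluster keyword -> its cluster name, flattened once at module level.
-- KEYWORD_TO_CLUSTER = {
--     "paranormal_horror": "PARANORMAL",
--     "haunted_location": "PARANORMAL",
--     "demonic_possession": "PARANORMAL",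
--     "space_sci_fi": "SPACE_SCI_FI",
--     "space_travel_loop": "SPACE_SCI_FI",
--     "alien_contact": "SPACE_SCI_FI",
--     "ai_sci_fi": "AI_SCI_FI",
--     "artificial_intelligence": "AI_SCI_FI",
--     "epic_fantasy": "FANTASY",
--     "magical_world": "FANTASY",
--     "dystopia_apocalypse": "DYSTOPIA",
--     "noir_thriller": "CRIME_NOIR",
--     "serial_killer": "CRIME_NOIR",
--     "maritime_survival": "ADVENTURE_SEA",
-- }
--
-- def get_movie_clusters(movie):
--     """Maps high-value themes to their respective conceptual clusters."""
--     combined = set(movie.get('high_themes', [])) | set(movie.get('themes', []))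
--     return {name for kw, name in KEYWORD_TO_CLUSTER.items() if kw in combined}
-- ===== Notes on version B (the rewrite author's own statement) =====
-- stated objective: idiomatic
-- what changed: Replaces the nested scan (for each cluster, test every keyword against the combined theme set) by a single flat pass over a module-level inverted index mapping each keyword to its cluster name.
import Mathlib
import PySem

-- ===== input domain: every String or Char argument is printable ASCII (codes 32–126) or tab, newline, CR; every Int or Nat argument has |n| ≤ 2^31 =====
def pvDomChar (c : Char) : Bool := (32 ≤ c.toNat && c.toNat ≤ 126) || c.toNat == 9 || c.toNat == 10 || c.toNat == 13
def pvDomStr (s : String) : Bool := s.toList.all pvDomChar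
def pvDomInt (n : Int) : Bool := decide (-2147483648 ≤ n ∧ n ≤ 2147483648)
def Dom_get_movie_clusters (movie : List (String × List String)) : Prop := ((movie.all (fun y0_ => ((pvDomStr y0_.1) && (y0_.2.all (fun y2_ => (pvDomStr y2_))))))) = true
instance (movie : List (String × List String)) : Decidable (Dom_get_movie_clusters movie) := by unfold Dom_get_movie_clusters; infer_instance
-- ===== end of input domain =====

-- B replaces A's nested scan of every cluster's keyword set by one flat pass over a
-- module-level inverted index (keyword -> cluster name); objective: idiomatic/simpler.

-- ===== PORT A =====
-- THEME_CLUSTERS (dict of name -> set of keywords), insertion order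
def themeClusters : List (String × List String) :=
  [("PARANORMAL",   ["paranormal_horror", "haunted_location", "demonic_possession"]),
   ("SPACE_SCI_FI", ["space_sci_fi", "space_travel_loop", "alien_contact"]),
   ("AI_SCI_FI",    ["ai_sci_fi", "artificial_intelligence"]),
   ("FANTASY",      ["epic_fantasy", "magical_world"]),
   ("DYSTOPIA",     ["dystopia_apocalypse"]),
   ("CRIME_NOIR",   ["noir_thriller", "serial_killer"]),
   ("ADVENTURE_SEA", ["maritime_survival"])]

def get_movie_clusters (movie : List (String × List String)) : List String :=
  let high_themes : PySem.Set String := PySem.Set.ofList (PySem.Dict.getD (PySem.Dict.mk movie) "high_themes" [])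
  let themes : PySem.Set String := PySem.Set.ofList (PySem.Dict.getD (PySem.Dict.mk movie) "themes" [])
  let combined : PySem.Set String := PySem.Set.union high_themes themes
  themeClusters.foldl
    (fun found p =>
      if p.2.any (fun kw => PySem.Set.contains combined kw) then PySem.Set.add found p.1
      else found)
    PySem.Set.empty

-- ===== PORT B =====
-- KEYWORD_TO_CLUSTER (dict keyword -> cluster name), insertion order
def keywordToCluster : List (String × String) :=
  [("paranormal_horror", "PARANORMAL"),
   ("haunted_location", "PARANORMAL"),
   ("demonic_possession", "PARANORMAL"),
   ("space_sci_fi", "SPACE_SCI_FI"),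
   ("space_travel_loop", "SPACE_SCI_FI"),
   ("alien_contact", "SPACE_SCI_FI"),
   ("ai_sci_fi", "AI_SCI_FI"),
   ("artificial_intelligence", "AI_SCI_FI"),
   ("epic_fantasy", "FANTASY"),
   ("magical_world", "FANTASY"),
   ("dystopia_apocalypse", "DYSTOPIA"),
   ("noir_thriller", "CRIME_NOIR"),
   ("serial_killer", "CRIME_NOIR"),
   ("maritime_survival", "ADVENTURE_SEA")]

def get_movie_clusters_alt (movie : List (String × List String)) : List String :=
  let combined : PySem.Set String :=
    PySem.Set.union (PySem.Set.ofList (PySem.Dict.getD (PySem.Dict.mk movie) "high_themes" []))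
                    (PySem.Set.ofList (PySem.Dict.getD (PySem.Dict.mk movie) "themes" []))
  keywordToCluster.foldl
    (fun found q =>
      if PySem.Set.contains combined q.1 then PySem.Set.add found q.2 else found)
    PySem.Set.empty

-- ===== PRECONDITION & SPEC =====
def Spec_get_movie_clusters (movie : List (String × List String)) (out : List String) : Prop := out = get_movie_clusters_alt movie
instance (movie : List (String × List String)) (out : List String) : Decidable (Spec_get_movie_clusters movie out) := by unfold Spec_get_movie_clusters; infer_instance

-- ===== CLAIM (what is proved, stated in full; the proofs are below) =====
def Claim_equal_get_movie_clusters : Prop := ∀ (movie : List (String × List String)), Dom_get_movie_clusters movie → Spec_get_movie_clusters movie (get_movie_clusters movie)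

-- ===== LEMMAS AND PROOFS =====

-- one cluster's block of the inverted index, folded keyword by keyword,
-- contributes exactly A's single any-test for that cluster
theorem block_fold (c : PySem.Set String) (n : String) :
    ∀ (ks : List String) (acc : PySem.Set String),
      ks.foldl (fun a k => if PySem.Set.contains c k then PySem.Set.add a n else a) acc
        = if ks.any (fun kw => PySem.Set.contains c kw) then PySem.Set.add acc n else acc := by
  intro ks
  induction ks with
  | nil => intro acc; simp
  | cons k ks ih =>
    intro acc
    simp only [List.foldl_cons, List.any_cons]
    by_cases h : PySem.Set.contains c k = true
    · rw [if_pos h, ih]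
      simp only [h, Bool.true_or]
      by_cases h2 : ks.any (fun kw => PySem.Set.contains c kw) = true
      · rw [if_pos h2]; simp
      · rw [if_neg h2]; simp
    · have h' : PySem.Set.contains c k = false := by simpa using h
      rw [if_neg h, ih]
      simp only [h', Bool.false_or]

theorem flat_fold (c : PySem.Set String) :
    ∀ (cl : List (String × List String)) (acc : PySem.Set String),
      (cl.flatMap (fun p => p.2.map (fun k => (k, p.1)))).foldl
          (fun a q => if PySem.Set.contains c q.1 then PySem.Set.add a q.2 else a) acc
        = cl.foldl
            (fun a p => if p.2.any (fun kw => PySem.Set.contains c kw) then PySem.Set.add a p.1 else a)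
            acc := by
  intro cl
  induction cl with
  | nil => intro acc; simp
  | cons p cl ih =>
    intro acc
    simp only [List.flatMap_cons, List.foldl_append, List.foldl_cons, List.foldl_map]
    rw [block_fold, ih]

theorem keywordToCluster_eq :
    keywordToCluster = themeClusters.flatMap (fun p => p.2.map (fun k => (k, p.1))) := by
  decide

-- ===== VERDICT (by name: the statement is the Claim_ definition above) =====
theorem get_movie_clusters_spec : Claim_equal_get_movie_clusters := by
  intro movie _
  unfold Spec_get_movie_clusters get_movie_clusters get_movie_clusters_alt
  rw [keywordToCluster_eq, flat_fold]
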